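-- pv_equiv track=rewrite | github.com/svlobao/deeplearning-for-computervision | Image_Classification/scripts/nearest_neighbor.py | _count
-- ===== SOURCE A (Python) =====
-- def _count(combined_neighbors: list[tuple]) -> str:
--
--     labels = list(zip(*combined_neighbors))[1]
--
--     label_count = {}
--
--     for label in labels:
--         if label in label_count:
--             label_count[label] += 1
--         else:
--             label_count[label] = 1
--
--     sorted_label_count = sorted(
--         label_count.items(), key=lambda pair: pair[1], reverse=True
--     )
--
--     return sorted_label_count[0][0]
-- ===== SOURCE B (Python) =====
-- def _count(combined_neighbors: list[tuple]) -> str: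
--     label_count = {}
--     for _, label in combined_neighbors:
--         label_count[label] = label_count.get(label, 0) + 1
--     items = list(label_count.items())
--     best_label, best_count = items[0]
--     for label, count in items[1:]:
--         if best_count < count:
--             best_label, best_count = label, count
--     return best_label
-- ===== Notes on version B (the rewrite author's own statement) =====
-- stated objective: simpler
-- what changed: B builds the same per-label counts in one dict pass and then picks the winner with a single linear max-scan over the dict items (strict '>' keeps the earliest-inserted label on ties), instead of A's sort of all items by count and taking the first element; B also iterates the input pairs directly instead of materialising zip(*...).
import Mathlib
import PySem

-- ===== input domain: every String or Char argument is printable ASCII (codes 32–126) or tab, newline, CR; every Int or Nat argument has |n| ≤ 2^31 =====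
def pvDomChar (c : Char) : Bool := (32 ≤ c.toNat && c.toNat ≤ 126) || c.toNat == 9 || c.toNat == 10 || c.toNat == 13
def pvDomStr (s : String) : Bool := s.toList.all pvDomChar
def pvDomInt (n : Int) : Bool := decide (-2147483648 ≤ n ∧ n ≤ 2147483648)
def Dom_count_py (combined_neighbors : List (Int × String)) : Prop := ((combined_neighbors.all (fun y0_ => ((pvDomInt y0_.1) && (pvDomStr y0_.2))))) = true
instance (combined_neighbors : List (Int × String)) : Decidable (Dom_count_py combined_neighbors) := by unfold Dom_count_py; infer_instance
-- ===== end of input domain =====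

-- B replaces A's sort-then-index selection of the most frequent label by a single
-- linear max-scan over the count dict's items (same counts, same tie-break: first
-- inserted label among those with the maximal count). Objective: simpler.

-- ===== PORT A =====
def count_py (combined_neighbors : List (Int × String)) : String :=
  -- labels = list(zip(*combined_neighbors))[1] : for a list of pairs this is the
  -- tuple of second components; raises IndexError when the list is empty (Pre_).
  let labels := combined_neighbors.map Prod.snd
  let label_count := labels.foldl
    (fun d label => if d.contains label then d.modify label 0 (· + 1) else d.insert label 1)
    (PySem.Dict.empty : PySem.Dict String Int)
  let sorted_label_count := PySem.List.sorted label_count.items (fun pair => pair.2) true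
  -- sorted_label_count[0][0]; the index raises IndexError on an empty list (Pre_)
  ((PySem.List.pyGet? sorted_label_count 0).getD ("", (0 : Int))).1

-- ===== PORT B =====
def count_py_alt (combined_neighbors : List (Int × String)) : String :=
  let label_count := combined_neighbors.foldl
    (fun d p => d.insert p.2 (d.getD p.2 0 + 1)) (PySem.Dict.empty : PySem.Dict String Int)
  let items := label_count.items
  match items with
  | [] => ""  -- items[0] raises IndexError here (excluded by Pre_)
  | first :: rest =>
    (rest.foldl (fun best p => if best.2 < p.2 then p else best) first).1

-- ===== PRECONDITION & SPEC =====
-- Pre_ excludes only the empty list, on which both Pythons raise IndexError.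
def Pre_count_py (combined_neighbors : List (Int × String)) : Prop :=
  combined_neighbors ≠ []
instance (combined_neighbors : List (Int × String)) : Decidable (Pre_count_py combined_neighbors) := by unfold Pre_count_py; infer_instance

def pvWitness_count_py : (List (Int × String)) := [((3 : Int), "a"), ((1 : Int), "b"), ((2 : Int), "a")]

def Spec_count_py (combined_neighbors : List (Int × String)) (out : String) : Prop := out = count_py_alt combined_neighbors
instance (combined_neighbors : List (Int × String)) (out : String) : Decidable (Spec_count_py combined_neighbors out) := by unfold Spec_count_py; infer_instance

-- ===== CLAIM (what is proved, stated in full; the proofs are below) =====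
def Claim_equal_count_py : Prop := ∀ (combined_neighbors : List (Int × String)), Dom_count_py combined_neighbors → Pre_count_py combined_neighbors → Spec_count_py combined_neighbors (count_py combined_neighbors)

-- ===== LEMMAS AND PROOFS =====

-- A's counting step is exactly dict-modify with default 0.
theorem stepA_eq_modify (d : PySem.Dict String Int) (x : String) :
    (if d.contains x then d.modify x 0 (· + 1) else d.insert x 1) = d.modify x 0 (· + 1) := by
  by_cases h : d.contains x
  · simp [h]
  · have hg : d.getD x 0 = 0 := by
      simp only [PySem.Dict.getD]
      rw [(PySem.Dict.get?_eq_none_iff_contains d x).2 (by simpa using h)]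
      rfl
    simp [h, PySem.Dict.modify, hg]

theorem insertBy_cons {α : Type} (before : α → α → Bool) (x y : α) (ys : List α) :
    PySem.List.insertBy before x (y :: ys) =
      if before x y then x :: y :: ys else y :: PySem.List.insertBy before x ys := rfl

-- head of the stable reverse sort = left fold keeping the strictly greater key
theorem head_sorted_rev (f : String × Int) (r : List (String × Int)) :
    (PySem.List.sorted (f :: r) (fun p => p.2) true).head? =
      some (r.foldl (fun best p => if best.2 < p.2 then p else best) f) := by
  induction r using List.reverseRecOn with
  | nil => simp [PySem.List.sorted, PySem.List.insertBy]
  | append_singleton r x ih =>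
    rw [PySem.List.sorted_rev_eq_foldl_insertBy] at *
    have hc : f :: (r ++ [x]) = (f :: r) ++ [x] := by simp
    rw [hc, List.foldl_append]
    obtain ⟨t, ht⟩ : ∃ t, List.foldl (fun acc x => PySem.List.insertBy (fun a b => decide (b.2 < a.2)) x acc) [] (f :: r)
        = (r.foldl (fun best p => if best.2 < p.2 then p else best) f) :: t := by
      cases hs : List.foldl (fun acc x => PySem.List.insertBy (fun a b => decide (b.2 < a.2)) x acc) [] (f :: r) with
      | nil => rw [hs] at ih; simp at ih
      | cons b t => rw [hs] at ih; simp at ih; exact ⟨t, by rw [ih]⟩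
    rw [ht, List.foldl_append]
    simp only [List.foldl_cons, List.foldl_nil, insertBy_cons]
    by_cases h : (r.foldl (fun best p => if best.2 < p.2 then p else best) f).2 < x.2
    · simp [h]
    · simp [h]

theorem count_py_eq (combined_neighbors : List (Int × String)) (h : combined_neighbors ≠ []) :
    count_py combined_neighbors = count_py_alt combined_neighbors := by
  obtain ⟨c, cs, rfl⟩ : ∃ c cs, combined_neighbors = c :: cs := by
    cases combined_neighbors with
    | nil => exact absurd rfl h
    | cons c cs => exact ⟨c, cs, rfl⟩
  simp only [count_py, count_py_alt]
  have hstep : (fun (d : PySem.Dict String Int) label =>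
      if d.contains label then d.modify label 0 (· + 1) else d.insert label 1) =
      fun d label => d.modify label 0 (· + 1) := by
    funext d x; exact stepA_eq_modify d x
  rw [hstep, ← PySem.Dict.counter_eq_foldl,
    show (c :: cs).foldl (fun d p => d.insert p.2 (d.getD p.2 0 + 1)) PySem.Dict.empty
      = PySem.Dict.counter ((c :: cs).map Prod.snd) by
        rw [← PySem.Dict.foldl_insert_getD_add_one_eq_counter ((c :: cs).map Prod.snd), List.foldl_map]]
  have hne : (PySem.Dict.counter ((c :: cs).map Prod.snd)).items ≠ [] := by
    intro he
    have hm : c.2 ∈ PySem.Set.ofList ((c :: cs).map Prod.snd) := by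
      rw [PySem.Set.mem_ofList]; simp
    rw [← PySem.Dict.keys_counter] at hm
    simp only [PySem.Dict.keys, he, List.map_nil] at hm
    exact (List.not_mem_nil) hm
  obtain ⟨f, r, hitems⟩ : ∃ f r, (PySem.Dict.counter ((c :: cs).map Prod.snd)).items = f :: r := by
    cases hi : (PySem.Dict.counter ((c :: cs).map Prod.snd)).items with
    | nil => exact absurd hi hne
    | cons f r => exact ⟨f, r, rfl⟩
  rw [hitems]
  obtain ⟨t, ht⟩ : ∃ t, PySem.List.sorted (f :: r) (fun p => p.2) true =
      (r.foldl (fun best p => if best.2 < p.2 then p else best) f) :: t := by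
    have hh := head_sorted_rev f r
    cases hs : PySem.List.sorted (f :: r) (fun p => p.2) true with
    | nil => rw [hs] at hh; simp at hh
    | cons b t => rw [hs] at hh; simp at hh; exact ⟨t, by rw [hh]⟩
  rw [ht]
  simp [PySem.List.pyGet?, PySem.List.pyIdx?]

-- ===== VERDICT (by name: the statement is the Claim_ definition above) =====
theorem count_py_spec : Claim_equal_count_py := by
  intro cn _ hpre
  unfold Spec_count_py
  exact count_py_eq cn hpre
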